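-- pv_equiv track=rewrite | github.com/TheFirstFen/lnu | year2/ta/1DT901/mini-proj/Solution/robot_grade_C.py | build_coord_map
-- ===== SOURCE A (Python) =====
-- def build_coord_map(plot_map):
--     szx = len(plot_map)
--     szy = len(plot_map[0])
--
--     coord_map = []
--     for y in range(0, szy):
--         col = []
--         for x in range(szx-1, -1, -1):
--             col += [plot_map[x][y]]
--         coord_map += [col]
--     return coord_map
-- ===== SOURCE B (Python) =====
-- def build_coord_map(plot_map):
--     szy = len(plot_map[0])
--     cols = [[] for _ in range(szy)]
--     for row in plot_map:
--         cols = [[row[y]] + cols[y] for y in range(szy)]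
--     return cols
-- ===== Notes on version B (the rewrite author's own statement) =====
-- stated objective: alternative
-- what changed: Single forward pass over the rows with an accumulator of szy columns, prepending each row's elements so the columns come out back-to-front, instead of A's two nested index loops (outer y, inner x counting down) that read each cell by double indexing.
import Mathlib
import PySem

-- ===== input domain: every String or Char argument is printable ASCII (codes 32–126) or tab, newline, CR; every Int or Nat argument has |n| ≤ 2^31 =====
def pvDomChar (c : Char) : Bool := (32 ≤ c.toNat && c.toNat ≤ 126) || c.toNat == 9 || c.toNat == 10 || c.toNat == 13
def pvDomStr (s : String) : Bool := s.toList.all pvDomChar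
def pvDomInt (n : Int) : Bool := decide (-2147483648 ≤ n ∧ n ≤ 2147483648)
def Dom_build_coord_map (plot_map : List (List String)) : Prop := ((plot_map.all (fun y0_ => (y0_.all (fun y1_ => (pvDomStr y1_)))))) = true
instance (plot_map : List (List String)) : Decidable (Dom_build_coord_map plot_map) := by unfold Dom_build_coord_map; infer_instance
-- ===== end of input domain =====

-- B builds the columns in one forward pass over the rows with an accumulator (prepending each
-- row's cells), instead of A's nested index loops; equal return values on Pre_.

-- ===== PORT A =====
def build_coord_map (plot_map : List (List String)) : List (List String) :=
  let szx : Int := plot_map.length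
  let szy : Int := (plot_map.headD []).length
  (PySem.List.pyRange 0 szy 1).foldl
    (fun coord_map y =>
      coord_map ++ [ (PySem.List.pyRange (szx - 1) (-1) (-1)).foldl
        (fun col x => col ++ [PySem.List.pyGetD (PySem.List.pyGetD plot_map x []) y ""]) [] ]) []

-- ===== PORT B =====
def build_coord_map_alt (plot_map : List (List String)) : List (List String) :=
  let szy : Int := (plot_map.headD []).length
  plot_map.foldl
    (fun cols row =>
      (PySem.List.pyRange 0 szy 1).map
        (fun y => PySem.List.pyGetD row y "" :: PySem.List.pyGetD cols y []))
    ((PySem.List.pyRange 0 szy 1).map (fun _ => ([] : List String)))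

-- ===== PRECONDITION & SPEC =====
-- Pre_ excludes exactly the inputs where Python A raises IndexError (B raises there too): the
-- empty list (plot_map[0]) and maps with a row shorter than row 0 (plot_map[x][y]).
def Pre_build_coord_map (plot_map : List (List String)) : Prop :=
  plot_map ≠ [] ∧ ∀ r ∈ plot_map, (plot_map.headD []).length ≤ r.length
instance (plot_map : List (List String)) : Decidable (Pre_build_coord_map plot_map) := by
  unfold Pre_build_coord_map; infer_instance

def pvWitness_build_coord_map : List (List String) := [["a", "b"], ["c", "d"], ["e", "f"]]

def Spec_build_coord_map (plot_map : List (List String)) (out : List (List String)) : Prop := out = build_coord_map_alt plot_map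
instance (plot_map : List (List String)) (out : List (List String)) : Decidable (Spec_build_coord_map plot_map out) := by unfold Spec_build_coord_map; infer_instance

-- ===== CLAIM (what is proved, stated in full; the proofs are below) =====
def Claim_equal_build_coord_map : Prop := ∀ (plot_map : List (List String)), Dom_build_coord_map plot_map → Pre_build_coord_map plot_map → Spec_build_coord_map plot_map (build_coord_map plot_map)

-- ===== LEMMAS AND PROOFS =====

-- canonical value: column y is [last row, …, first row] at index y
def canon (pm : List (List String)) (szy : Nat) : List (List String) :=
  (List.range szy).map (fun y => pm.reverse.map (fun r => r.getD y ""))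

theorem map_getD_range (xs : List (List String)) (d : List String) :
    (List.range xs.length).map (fun k => xs.getD k d) = xs := by
  induction xs with
  | nil => simp
  | cons a t ih =>
      simp [List.range_succ_eq_map, List.map_map]
      exact ih

theorem A_eq_canon (pm : List (List String)) :
    build_coord_map pm = canon pm (pm.headD []).length := by
  unfold build_coord_map canon
  simp only [PySem.List.foldl_append_singleton_eq_map, List.nil_append]
  rw [PySem.List.pyRange_one, PySem.List.pyRange_neg_one]
  have h1 : (((pm.headD []).length : Int) - 0).toNat = (pm.headD []).length := by omega
  have h2 : (((pm.length : Int) - 1) - (-1)).toNat = pm.length := by omega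
  rw [h1, h2]
  rw [List.map_map]
  apply List.map_congr_left
  intro y hy
  simp only [Function.comp_apply, zero_add]
  rw [List.map_map]
  have : ∀ k ∈ List.range pm.length,
      ((fun x => PySem.List.pyGetD (PySem.List.pyGetD pm x []) ((y : Nat) : Int) "") ∘
        fun k : Nat => ((pm.length : Int) - 1) - (k : Int)) k
      = (fun k : Nat => (pm.reverse.getD k []).getD y "") k := by
    intro k hk
    simp only [List.mem_range] at hk
    simp only [Function.comp]
    have hidx : ((pm.length : Int) - 1 - (k : Int)) = ((pm.length - 1 - k : Nat) : Int) := by omega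
    rw [hidx, PySem.List.pyGetD_natCast, PySem.List.pyGetD_natCast]
    congr 1
    rw [List.getD_eq_getElem?_getD, List.getD_eq_getElem?_getD,
        List.getElem?_reverse hk]
  rw [List.map_congr_left this]
  have h3 := map_getD_range pm.reverse []
  rw [List.length_reverse] at h3
  calc (List.range pm.length).map (fun k : Nat => (pm.reverse.getD k []).getD y "")
      = ((List.range pm.length).map (fun k => pm.reverse.getD k [])).map
          (fun r => r.getD y "") := by simp [List.map_map, Function.comp]
    _ = pm.reverse.map (fun r => r.getD y "") := by rw [h3]

-- the accumulator invariant of B's single pass: folding pm onto columns (range n).map g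
-- yields, at y, pm's cells at y back-to-front prepended to g y
theorem foldB_inv (n : Nat) :
    ∀ (pm : List (List String)) (g : Nat → List String),
    pm.foldl
      (fun cols row => (List.range n).map (fun y => row.getD y "" :: cols.getD y []))
      ((List.range n).map g)
    = (List.range n).map (fun y => pm.reverse.map (fun r => r.getD y "") ++ g y) := by
  intro pm
  induction pm with
  | nil => intro g; simp
  | cons row pm' ih =>
      intro g
      simp only [List.foldl_cons]
      have hstep : ((List.range n).map fun y => row.getD y "" :: ((List.range n).map g).getD y [])
          = (List.range n).map (fun y => row.getD y "" :: g y) := by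
        apply List.map_congr_left
        intro y hy
        have hylt : y < n := List.mem_range.1 hy
        congr 1
        rw [List.getD_eq_getElem?_getD, List.getElem?_map]
        simp [List.getElem?_range hylt]
      rw [hstep, ih (fun y => row.getD y "" :: g y)]
      apply List.map_congr_left
      intro y _
      simp

theorem B_eq_canon (pm : List (List String)) :
    build_coord_map_alt pm = canon pm (pm.headD []).length := by
  unfold build_coord_map_alt canon
  simp only
  set n := (pm.headD []).length with hn
  rw [PySem.List.pyRange_one]
  have h1 : (((n : Int)) - 0).toNat = n := by omega
  rw [h1]
  simp only [List.map_map, Function.comp_def]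
  have hfold : List.foldl
      (fun (cols : List (List String)) (row : List String) =>
        (List.range n).map fun k : Nat =>
          PySem.List.pyGetD row ((0 : Int) + (k : Int)) ""
            :: PySem.List.pyGetD cols ((0 : Int) + (k : Int)) [])
      ((List.range n).map fun _ => ([] : List String)) pm
      = List.foldl
      (fun cols row => (List.range n).map (fun y => row.getD y "" :: cols.getD y []))
      ((List.range n).map fun _ => ([] : List String)) pm := by
    apply PySem.List.foldl_congr_mem
    intro cols row _
    apply List.map_congr_left
    intro k _
    have hk : ((0 : Int) + (k : Int)) = ((k : Nat) : Int) := by omega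
    rw [hk, PySem.List.pyGetD_natCast, PySem.List.pyGetD_natCast]
  rw [hfold, foldB_inv n pm (fun _ => [])]
  simp

-- ===== VERDICT (by name: the statement is the Claim_ definition above) =====
theorem build_coord_map_spec : Claim_equal_build_coord_map := by
  intro pm _ _
  unfold Spec_build_coord_map
  rw [A_eq_canon pm, B_eq_canon pm]
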